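-- pv_equiv track=rewrite | github.com/yogii7664/Code-Overflow | xepdiem.py | soSanh
-- ===== SOURCE A (Python) =====
-- def soSanh(a,b):
-- 	for i in a:
-- 		if i in b:
-- 			b.remove(i)
-- 	if len(b) in [1,2]:
-- 		return(True)
-- 	else:
-- 		return(False)
-- ===== SOURCE B (Python) =====
-- def soSanh(a, b):
--     budget = {}
--     for x in a:
--         budget[x] = budget.get(x, 0) + 1
--     kept = []
--     for x in b:
--         if budget.get(x, 0) > 0:
--             budget[x] = budget[x] - 1
--         else:
--             kept.append(x)
--     b[:] = kept
--     return 1 <= len(kept) <= 2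
-- ===== Notes on version B (the rewrite author's own statement) =====
-- stated objective: faster
-- what changed: Replaces the nested membership-test-and-remove scan over b for every element of a with a precomputed removal-budget dict over a and one forward pass over b that keeps each element whose budget is exhausted.
import Mathlib
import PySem

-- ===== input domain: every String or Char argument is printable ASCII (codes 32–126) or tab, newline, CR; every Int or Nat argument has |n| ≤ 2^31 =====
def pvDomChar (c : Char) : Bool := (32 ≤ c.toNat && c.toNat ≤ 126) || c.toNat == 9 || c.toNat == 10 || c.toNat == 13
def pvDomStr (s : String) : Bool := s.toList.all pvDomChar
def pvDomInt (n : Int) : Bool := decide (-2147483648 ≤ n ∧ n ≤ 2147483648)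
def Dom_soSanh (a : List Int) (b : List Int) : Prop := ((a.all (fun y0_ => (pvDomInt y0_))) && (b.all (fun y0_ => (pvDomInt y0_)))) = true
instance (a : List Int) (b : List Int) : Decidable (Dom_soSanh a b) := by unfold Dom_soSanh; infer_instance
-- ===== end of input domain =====

-- B replaces A's nested scan-and-remove with a budget dict + one pass over b (faster);
-- both Pythons mutate b in place and leave the SAME final list there (proved: the lists are equal).

-- ===== PORT A =====
-- for i in a: if i in b: b.remove(i)
def soSanhLoopA (a : List Int) (b : List Int) : List Int :=
  a.foldl (fun b i => if i ∈ b then (PySem.List.remove? b i).getD b else b) b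

def soSanh (a : List Int) (b : List Int) : Bool :=
  let b' := soSanhLoopA a b
  if b'.length = 1 ∨ b'.length = 2 then true else false

-- ===== PORT B =====
-- budget = {}; for x in a: budget[x] = budget.get(x,0)+1
def soSanhBudget (a : List Int) : PySem.Dict Int Int :=
  a.foldl (fun d x => d.insert x (d.getD x 0 + 1)) PySem.Dict.empty

-- kept = []; for x in b: if budget.get(x,0) > 0: budget[x] -= 1 else: kept.append(x)
def soSanhKeep (b : List Int) (st : PySem.Dict Int Int × List Int) : PySem.Dict Int Int × List Int :=
  b.foldl (fun s x =>
    if 0 < s.1.getD x 0 then (s.1.insert x (s.1.getD x 0 - 1), s.2)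
    else (s.1, s.2 ++ [x])) st

def soSanh_alt (a : List Int) (b : List Int) : Bool :=
  let kept := (soSanhKeep b (soSanhBudget a, [])).2
  decide (1 ≤ kept.length ∧ kept.length ≤ 2)

-- ===== PRECONDITION & SPEC =====
def Spec_soSanh (a : List Int) (b : List Int) (out : Bool) : Prop := out = soSanh_alt a b
instance (a : List Int) (b : List Int) (out : Bool) : Decidable (Spec_soSanh a b out) := by unfold Spec_soSanh; infer_instance

-- ===== CLAIM (what is proved, stated in full; the proofs are below) =====
def Claim_equal_soSanh : Prop := ∀ (a : List Int) (b : List Int), Dom_soSanh a b → Spec_soSanh a b (soSanh a b)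

-- ===== LEMMAS AND PROOFS =====

-- proof-side model of B's pass: a pure counting function instead of the dict
def keepF (f : Int → Int) : List Int → List Int
  | [] => []
  | x :: rest =>
      if 0 < f x then keepF (fun y => if y = x then f y - 1 else f y) rest
      else x :: keepF f rest

theorem keepF_congr (b : List Int) : ∀ (f g : Int → Int), (∀ x, f x = g x) → keepF f b = keepF g b := by
  induction b with
  | nil => intro f g h; rfl
  | cons x rest ih =>
      intro f g h
      simp only [keepF, h x]
      split_ifs with hx
      · exact ih _ _ (fun y => by by_cases hy : y = x <;> simp [hy, h])
      · rw [ih f g h]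

theorem keepF_nonpos (b : List Int) (f : Int → Int) (hf : ∀ x, f x ≤ 0) : keepF f b = b := by
  induction b with
  | nil => rfl
  | cons x rest ih =>
      simp only [keepF]
      rw [if_neg (by have := hf x; omega)]
      rw [ih]

-- B's dict pass computes keepF of any pointwise-equal function
theorem keep_eq_keepF (b : List Int) :
    ∀ (d : PySem.Dict Int Int) (kept : List Int) (f : Int → Int),
    (∀ x, d.getD x 0 = f x) → (soSanhKeep b (d, kept)).2 = kept ++ keepF f b := by
  induction b with
  | nil => intro d kept f _; simp [soSanhKeep, keepF]
  | cons x rest ih =>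
      intro d kept f h
      simp only [soSanhKeep, List.foldl_cons] at *
      simp only [h x]
      split_ifs with hx
      · simp only [keepF, if_pos hx]
        exact ih _ _ _ (fun y => by
          rw [PySem.Dict.getD_insert]
          by_cases hy : y = x <;> simp [hy, h])
      · simp only [keepF, if_neg hx]
        rw [ih d (kept ++ [x]) f h]
        simp

-- the budget dict is the count of a
theorem budget_getD (a : List Int) :
    ∀ (d : PySem.Dict Int Int) (x : Int),
    (a.foldl (fun d x => d.insert x (d.getD x 0 + 1)) d).getD x 0 = d.getD x 0 + (a.count x : Int) := by
  induction a with
  | nil => intro d x; simp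
  | cons i rest ih =>
      intro d x
      simp only [List.foldl_cons, ih, PySem.Dict.getD_insert, List.count_cons]
      by_cases hx : x = i <;> simp [hx] <;> omega

-- removing one occurrence of i from b = one extra unit of budget at i
theorem keepF_cons_pos (f : Int → Int) (x : Int) (rest : List Int) (h : 0 < f x) :
    keepF f (x :: rest) = keepF (fun y => if y = x then f y - 1 else f y) rest := by
  simp only [keepF, if_pos h]

theorem keepF_cons_neg (f : Int → Int) (x : Int) (rest : List Int) (h : ¬ 0 < f x) :
    keepF f (x :: rest) = x :: keepF f rest := by
  simp only [keepF, if_neg h]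

theorem bump_remove (b : List Int) :
    ∀ (f : Int → Int) (i : Int), (∀ x, 0 ≤ f x) →
    keepF (fun y => if y = i then f y + 1 else f y) b
      = keepF f (if i ∈ b then (PySem.List.remove? b i).getD b else b) := by
  induction b with
  | nil => intro f i _; simp [keepF]
  | cons x rest ih =>
      intro f i hf
      by_cases hxi : x = i
      · subst hxi
        rw [if_pos (List.mem_cons_self), PySem.List.remove?_cons_self, Option.getD_some]
        rw [keepF_cons_pos _ x rest
          (show (0:Int) < (if x = x then f x + 1 else f x) by rw [if_pos rfl]; have := hf x; omega)]
        exact keepF_congr rest _ _ (fun y => by by_cases hy : y = x <;> simp [hy])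
      · have hix : ¬ i = x := fun h => hxi h.symm
        set R := (if i ∈ rest then (PySem.List.remove? rest i).getD rest else rest) with hR
        have hrest : (if i ∈ x :: rest then (PySem.List.remove? (x :: rest) i).getD (x :: rest) else x :: rest)
            = x :: R := by
          rw [PySem.List.remove?_cons_of_ne rest hxi]
          by_cases hi : i ∈ rest
          · rw [hR, PySem.List.remove?_eq_some_erase rest i hi]
            simp [hi]
          · rw [hR, (PySem.List.remove?_eq_none_iff rest i).mpr hi]
            simp [hi, hix]
        rw [hrest]
        by_cases hx0 : 0 < f x
        · rw [keepF_cons_pos _ x rest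
              (show (0:Int) < (if x = i then f x + 1 else f x) by rw [if_neg hxi]; exact hx0),
            keepF_cons_pos f x R hx0]
          rw [keepF_congr rest _
              (fun y => if y = i then (fun z => if z = x then f z - 1 else f z) y + 1
                        else (fun z => if z = x then f z - 1 else f z) y)
              (by intro y
                  by_cases hy1 : y = x
                  · simp [hy1, hxi]
                  · by_cases hy2 : y = i <;> simp [hy1, hy2, hix])]
          rw [ih (fun z => if z = x then f z - 1 else f z) i
            (fun y => by by_cases hy : y = x <;> simp [hy] <;> [omega; exact hf y])]
        · rw [keepF_cons_neg _ x rest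
              (show ¬ (0:Int) < (if x = i then f x + 1 else f x) by rw [if_neg hxi]; exact hx0),
            keepF_cons_neg f x R hx0]
          exact congrArg (x :: ·) (ih f i hf)

-- A's loop equals keepF of the count of a
theorem loopA_eq_keepF (a : List Int) :
    ∀ (b : List Int), soSanhLoopA a b = keepF (fun x => (a.count x : Int)) b := by
  induction a with
  | nil =>
      intro b
      simp only [soSanhLoopA, List.foldl_nil]
      rw [keepF_nonpos b _ (fun x => by simp)]
  | cons i rest ih =>
      intro b
      simp only [soSanhLoopA, List.foldl_cons] at *
      rw [ih]
      rw [keepF_congr b (fun x => ((i :: rest).count x : Int))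
            (fun y => if y = i then (fun x => ((rest.count x : Int))) y + 1 else (rest.count y : Int))
            (by intro y; by_cases hy : y = i
                · simp [hy]
                · simp [hy, Ne.symm hy])]
      rw [bump_remove b _ i (fun x => by positivity)]

-- ===== VERDICT (by name: the statement is the Claim_ definition above) =====
theorem soSanh_spec : Claim_equal_soSanh := by
  intro a b _
  unfold Spec_soSanh soSanh soSanh_alt
  have hb : (soSanhKeep b (soSanhBudget a, [])).2 = keepF (fun x => (a.count x : Int)) b := by
    rw [keep_eq_keepF b (soSanhBudget a) [] (fun x => (a.count x : Int))
        (fun x => by simp [soSanhBudget, budget_getD])]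
    simp
  have ha := loopA_eq_keepF a b
  simp only [ha, hb]
  set n := (keepF (fun x => (a.count x : Int)) b).length with hn
  by_cases h : n = 1 ∨ n = 2 <;> simp [h] <;> omega
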